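-- pv_equiv track=rewrite | github.com/simonavrillon/MUedit2 | python/src/muedit/services/editing_service.py | _generate_mu_uids
-- ===== SOURCE A (Python) =====
-- def _generate_mu_uids(mu_grid_index: list[int]) -> list[str]:
--     counts: dict[int, int] = {}
--     uids: list[str] = []
--     for grid_idx in mu_grid_index:
--         count = counts.get(grid_idx, 0)
--         uids.append(f"g{grid_idx}_mu{count}")
--         counts[grid_idx] = count + 1
--     return uids
-- ===== SOURCE B (Python) =====
-- def _generate_mu_uids(mu_grid_index: list[int]) -> list[str]:
--     # Group positions by grid value, then scatter numbered uids back by position.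
--     positions: dict[int, list[int]] = {}
--     for i, v in enumerate(mu_grid_index):
--         positions.setdefault(v, []).append(i)
--     result = [""] * len(mu_grid_index)
--     for v, ps in positions.items():
--         for k, p in enumerate(ps):
--             result[p] = f"g{v}_mu{k}"
--     return result
-- ===== Notes on version B (the rewrite author's own statement) =====
-- stated objective: alternative
-- what changed: Replaces A's single forward pass with a running counter dict by a two-stage group-and-scatter: first build a dict mapping each grid value to the list of positions where it occurs, then number each group's positions and write the uids back into a pre-sized result list by original position.
import Mathlib
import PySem

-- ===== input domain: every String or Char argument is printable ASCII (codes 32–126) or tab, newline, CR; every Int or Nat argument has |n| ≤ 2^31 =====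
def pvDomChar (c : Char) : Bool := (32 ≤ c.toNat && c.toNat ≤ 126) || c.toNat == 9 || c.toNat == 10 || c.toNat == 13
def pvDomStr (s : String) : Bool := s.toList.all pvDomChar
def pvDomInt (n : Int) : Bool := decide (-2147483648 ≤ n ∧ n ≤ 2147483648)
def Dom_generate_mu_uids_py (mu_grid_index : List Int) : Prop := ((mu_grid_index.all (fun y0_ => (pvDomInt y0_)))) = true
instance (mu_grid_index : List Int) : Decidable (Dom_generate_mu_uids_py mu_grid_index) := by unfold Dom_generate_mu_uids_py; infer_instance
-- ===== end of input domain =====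

-- B replaces A's single-pass running-counter loop by a group-by-value-then-scatter-by-position two-stage algorithm (alternative decomposition; same results).


-- ===== PORT A =====
def generate_mu_uids_py (mu_grid_index : List Int) : List String :=
  (mu_grid_index.foldl
    (fun (st : PySem.Dict Int Int × List String) grid_idx =>
      let count := st.1.getD grid_idx 0
      (st.1.insert grid_idx (count + 1),
       st.2 ++ ["g" ++ PySem.Int.toStr grid_idx ++ "_mu" ++ PySem.Int.toStr count]))
    (PySem.Dict.empty, [])).2

-- ===== PORT B =====
-- result[p] = … is ported as pySetD: every index B writes is a valid index of result,
-- where Python's item assignment cannot raise, so the total form is exact there.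
def generate_mu_uids_py_alt (mu_grid_index : List Int) : List String :=
  let positions : PySem.Dict Int (List Int) :=
    (PySem.List.enumerate mu_grid_index 0).foldl
      (fun d p => d.modify p.2 [] (· ++ [p.1])) PySem.Dict.empty
  positions.items.foldl
    (fun res q =>
      (PySem.List.enumerate q.2 0).foldl
        (fun r w =>
          PySem.List.pySetD r w.2
            ("g" ++ PySem.Int.toStr q.1 ++ "_mu" ++ PySem.Int.toStr w.1)) res)
    (List.replicate mu_grid_index.length "")

-- ===== PRECONDITION & SPEC =====
def Spec_generate_mu_uids_py (mu_grid_index : List Int) (out : List String) : Prop := out = generate_mu_uids_py_alt mu_grid_index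
instance (mu_grid_index : List Int) (out : List String) : Decidable (Spec_generate_mu_uids_py mu_grid_index out) := by unfold Spec_generate_mu_uids_py; infer_instance

-- ===== CLAIM (what is proved, stated in full; the proofs are below) =====
def Claim_equal_generate_mu_uids_py : Prop := ∀ (mu_grid_index : List Int), Dom_generate_mu_uids_py mu_grid_index → Spec_generate_mu_uids_py mu_grid_index (generate_mu_uids_py mu_grid_index)

-- ===== LEMMAS AND PROOFS =====

def posOf (xs : List Int) (v : Int) : List Int :=
  ((((PySem.List.enumerate xs 0).map (fun p => (p.2, p.1))).filter
      (fun q => q.1 == v)).map (·.2))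

theorem posOf_append_singleton (xs : List Int) (x v : Int) :
    posOf (xs ++ [x]) v =
      posOf xs v ++ (if x = v then [(xs.length : Int)] else []) := by
  unfold posOf
  rw [PySem.List.enumerate_append]
  simp [PySem.List.enumerate_cons, PySem.List.enumerate_nil, List.filter_append]
  by_cases h : x = v <;> simp [h]

theorem length_posOf (xs : List Int) (v : Int) :
    (posOf xs v).length = xs.count v := by
  induction xs using List.reverseRecOn with
  | nil => simp [posOf, PySem.List.enumerate_nil]
  | append_singleton xs x ih =>
    rw [posOf_append_singleton, List.count_append]
    by_cases h : x = v <;> simp [h, ih]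

theorem posOf_spec (xs : List Int) (v : Int) : ∀ (k : Nat), k < (posOf xs v).length →
    ∃ n : Nat, (posOf xs v)[k]? = some (n : Int) ∧ n < xs.length ∧
      xs[n]? = some v ∧ (xs.take n).count v = k := by
  induction xs using List.reverseRecOn with
  | nil => intro k hk; simp [posOf, PySem.List.enumerate_nil] at hk
  | append_singleton xs x ih =>
    intro k hk
    rw [posOf_append_singleton] at hk ⊢
    by_cases hx : x = v
    · simp [hx] at hk ⊢
      rcases Nat.lt_or_ge k (posOf xs v).length with h | h
      · rcases ih k h with ⟨n, h1, h2, h3, h4⟩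
        refine ⟨n, ?_, by omega, ?_, ?_⟩
        · rw [List.getElem?_append_left h]; exact h1
        · rw [List.getElem?_append_left h2]; exact h3
        · rw [List.take_append_of_le_length (le_of_lt h2)]; exact h4
      · have hk' : k = (posOf xs v).length := by omega
        subst hk'
        refine ⟨xs.length, ?_, by simp, ?_, ?_⟩
        · rw [List.getElem?_append_right (le_refl _)]; simp
        · simp
        · rw [List.take_left]; rw [length_posOf]
    · simp only [hx, if_false, List.append_nil] at hk ⊢
      rcases ih k hk with ⟨n, h1, h2, h3, h4⟩
      refine ⟨n, h1, by simp; omega, ?_, ?_⟩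
      · rw [List.getElem?_append_left h2]; exact h3
      · rw [List.take_append_of_le_length (le_of_lt h2)]; exact h4

theorem mem_posOf (xs : List Int) (v : Int) (n : Nat) (hn : n < xs.length)
    (hv : xs[n]? = some v) : (n : Int) ∈ posOf xs v := by
  unfold posOf
  simp only [List.mem_map, List.mem_filter]
  refine ⟨(v, (0 : Int) + n), ⟨⟨((0 : Int) + n, v), ?_, rfl⟩, by simp⟩, by simp⟩
  rw [PySem.List.mem_enumerate_iff]
  exact ⟨n, hn, by simp_all⟩

def fmtUid (v k : Int) : String := "g" ++ PySem.Int.toStr v ++ "_mu" ++ PySem.Int.toStr k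

def refList (xs : List Int) : List String :=
  (PySem.List.enumerate xs 0).map
    (fun p => fmtUid p.2 (((PySem.List.slice xs none (some p.1)).count p.2 : Int)))

theorem refList_getD (xs : List Int) (n : Nat) (hn : n < xs.length) :
    (refList xs).getD n "" = fmtUid xs[n] (((xs.take n).count xs[n] : Int)) := by
  unfold refList
  have hlen : n < (PySem.List.enumerate xs 0).length := by
    simpa [PySem.List.length_enumerate] using hn
  rw [List.getD_eq_getElem?_getD, List.getElem?_map]
  rw [List.getElem?_eq_getElem hlen]
  simp only [Option.map_some, Option.getD_some]
  rw [PySem.List.getElem_enumerate]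
  have h0 : (0 : Int) + n = ((n : Nat) : Int) := by simp
  simp only [h0]
  rw [PySem.List.slice_to_natCast]

theorem scatter_length (ws : List (Int × String)) :
    ∀ (l : List String), (ws.foldl (fun r w => PySem.List.pySetD r w.1 w.2) l).length = l.length := by
  induction ws with
  | nil => intro l; rfl
  | cons w ws ih => intro l; rw [List.foldl_cons, ih, PySem.List.length_pySetD]

theorem scatter_getD (ref : List String) :
    ∀ (ws : List (Int × String)),
    (∀ w ∈ ws, ∃ n : Nat, w.1 = (n : Int) ∧ n < ref.length ∧ w.2 = ref.getD n "") →
    ∀ (l : List String), l.length = ref.length → ∀ i : Nat, i < ref.length →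
    (ws.foldl (fun r w => PySem.List.pySetD r w.1 w.2) l).getD i "" =
      if ∃ w ∈ ws, w.1 = (i : Int) then ref.getD i "" else l.getD i "" := by
  intro ws
  induction ws with
  | nil => intro _ l _ i _; simp
  | cons w ws ih =>
    intro hws l hl i hi
    rw [List.foldl_cons]
    obtain ⟨n, hn1, hn2, hn3⟩ := hws w (by simp)
    have hset : PySem.List.pySetD l w.1 w.2 = l.set n w.2 := by
      rw [hn1, PySem.List.pySetD_natCast]
    have hlen' : (PySem.List.pySetD l w.1 w.2).length = ref.length := by
      rw [PySem.List.length_pySetD, hl]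
    rw [ih (fun w hw => hws w (by simp [hw])) _ hlen' i hi]
    by_cases htail : ∃ w ∈ ws, w.1 = (i : Int)
    · simp [htail]
    · simp only [htail, if_false]
      rw [hset]
      by_cases hin : i = n
      · subst hin
        have hcond : ∃ w' ∈ w :: ws, w'.1 = (i : Int) := ⟨w, by simp, hn1⟩
        rw [if_pos hcond, ← hn3]
        simp [List.getD_eq_getElem?_getD, show i < l.length by omega]
      · have hcond : ¬ ∃ w' ∈ w :: ws, w'.1 = (i : Int) := by
          simp only [List.mem_cons]
          rintro ⟨w', (rfl | hw'), he⟩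
          · exact hin (by exact_mod_cast (hn1.symm.trans he).symm)
          · exact htail ⟨w', hw', he⟩
        rw [if_neg hcond]
        simp [List.getD_eq_getElem?_getD, List.getElem?_set_ne (fun hh => hin hh.symm)]

theorem length_refList (xs : List Int) : (refList xs).length = xs.length := by
  simp [refList, PySem.List.length_enumerate]

theorem positions_getD (xs : List Int) (v : Int) :
    ((PySem.List.enumerate xs 0).foldl
      (fun d p => d.modify p.2 [] (· ++ [p.1])) (PySem.Dict.empty : PySem.Dict Int (List Int))).getD v []
    = posOf xs v := by
  have h : (PySem.List.enumerate xs 0).foldl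
      (fun (d : PySem.Dict Int (List Int)) p => d.modify p.2 [] (· ++ [p.1])) PySem.Dict.empty
      = ((PySem.List.enumerate xs 0).map (fun p => (p.2, p.1))).foldl
          (fun d q => d.modify q.1 [] (· ++ [q.2])) PySem.Dict.empty := by
    rw [List.foldl_map]
  rw [h, PySem.Dict.getD_foldl_modify_append, PySem.Dict.getD_empty]
  rfl

theorem positions_keys (xs : List Int) :
    ((PySem.List.enumerate xs 0).foldl
      (fun d p => d.modify p.2 [] (· ++ [p.1])) (PySem.Dict.empty : PySem.Dict Int (List Int))).keys
    = PySem.Set.ofList xs := by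
  rw [PySem.Dict.keys_foldl_modify_key (key := fun (p : Int × Int) => p.2)]
  rw [PySem.Dict.keys_empty, PySem.List.map_snd_enumerate, PySem.Set.update_nil_left]

theorem positions_nodup (xs : List Int) :
    ((PySem.List.enumerate xs 0).foldl
      (fun d p => d.modify p.2 [] (· ++ [p.1])) (PySem.Dict.empty : PySem.Dict Int (List Int))).keys.Nodup := by
  exact PySem.Dict.nodup_keys_foldl_modify_key _ _ _ _ _ PySem.Dict.nodup_keys_empty

theorem B_eq_refList (xs : List Int) : generate_mu_uids_py_alt xs = refList xs := by
  unfold generate_mu_uids_py_alt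
  simp only []
  set positions := (PySem.List.enumerate xs 0).foldl
      (fun d p => d.modify p.2 [] (· ++ [p.1])) (PySem.Dict.empty : PySem.Dict Int (List Int)) with hpos
  have hitems : positions.items = (PySem.Set.ofList xs).map (fun v => (v, posOf xs v)) := by
    rw [PySem.Dict.items_eq_map_keys positions (positions_nodup xs) []]
    rw [positions_keys xs]
    exact List.map_congr_left (fun v _ => by rw [positions_getD xs v])
  -- flatten the nested fold into a single write list
  have hflat : ∀ (init : List String),
      positions.items.foldl
        (fun res q => (PySem.List.enumerate q.2 0).foldl
          (fun r w => PySem.List.pySetD r w.2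
            ("g" ++ PySem.Int.toStr q.1 ++ "_mu" ++ PySem.Int.toStr w.1)) res) init
      = (positions.items.flatMap
          (fun q => (PySem.List.enumerate q.2 0).map
            (fun w => (w.2, fmtUid q.1 w.1)))).foldl
          (fun r w => PySem.List.pySetD r w.1 w.2) init := by
    intro init
    rw [List.foldl_flatMap]
    have hfun : (fun (res : List String) (q : Int × List Int) =>
        (PySem.List.enumerate q.2 0).foldl
          (fun r w => PySem.List.pySetD r w.2
            ("g" ++ PySem.Int.toStr q.1 ++ "_mu" ++ PySem.Int.toStr w.1)) res)
        = (fun (res : List String) (q : Int × List Int) =>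
            ((PySem.List.enumerate q.2 0).map (fun w => (w.2, fmtUid q.1 w.1))).foldl
              (fun r w => PySem.List.pySetD r w.1 w.2) res) := by
      funext res q
      rw [List.foldl_map]
      rfl
    rw [hfun]
  rw [hflat]
  set ws := positions.items.flatMap
      (fun q => (PySem.List.enumerate q.2 0).map (fun w => (w.2, fmtUid q.1 w.1))) with hws
  have hwsspec : ∀ w ∈ ws, ∃ n : Nat, w.1 = (n : Int) ∧ n < (refList xs).length ∧
      w.2 = (refList xs).getD n "" := by
    intro w hw
    rw [hws, List.mem_flatMap] at hw
    obtain ⟨q, hq, hwq⟩ := hw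
    rw [hitems, List.mem_map] at hq
    obtain ⟨v, hv, rfl⟩ := hq
    rw [List.mem_map] at hwq
    obtain ⟨e, he, rfl⟩ := hwq
    rw [PySem.List.mem_enumerate_iff] at he
    obtain ⟨k, hk, rfl⟩ := he
    obtain ⟨n, h1, h2, h3, h4⟩ := posOf_spec xs v k hk
    rw [List.getElem?_eq_getElem hk] at h1
    have hpn : (posOf xs v)[k] = (n : Int) := by injection h1
    refine ⟨n, by simpa using hpn, by rw [length_refList]; exact h2, ?_⟩
    rw [refList_getD xs n h2]
    have hxv : xs[n] = v := by
      rw [List.getElem?_eq_getElem h2] at h3; injection h3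
    rw [hxv, h4]
    simp [fmtUid]
  have hcover : ∀ i : Nat, i < xs.length → ∃ w ∈ ws, w.1 = (i : Int) := by
    intro i hi
    have hv : (i : Int) ∈ posOf xs xs[i] := mem_posOf xs xs[i] i hi (List.getElem?_eq_getElem hi)
    obtain ⟨k, hk, hki⟩ := List.mem_iff_getElem.mp hv
    refine ⟨((i : Int), fmtUid xs[i] ((0 : Int) + k)), ?_, rfl⟩
    rw [hws, List.mem_flatMap]
    refine ⟨(xs[i], posOf xs xs[i]), ?_, ?_⟩
    · rw [hitems, List.mem_map]
      exact ⟨xs[i], by rw [PySem.Set.mem_ofList]; exact List.getElem_mem hi, rfl⟩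
    · rw [List.mem_map]
      refine ⟨((0 : Int) + k, (posOf xs xs[i])[k]), ?_, by rw [hki]⟩
      rw [PySem.List.mem_enumerate_iff]
      exact ⟨k, hk, rfl⟩
  have hinitlen : (List.replicate xs.length "").length = (refList xs).length := by
    simp [length_refList]
  have hlen : ((ws.foldl (fun r w => PySem.List.pySetD r w.1 w.2)
      (List.replicate xs.length ""))).length = (refList xs).length := by
    rw [scatter_length, List.length_replicate, length_refList]
  refine List.ext_getElem (by rw [hlen, length_refList]) (fun i h1 h2 => ?_)
  have := scatter_getD (refList xs) ws hwsspec (List.replicate xs.length "") hinitlen i h2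
  rw [if_pos (hcover i (by rw [← length_refList xs]; exact h2))] at this
  rw [List.getD_eq_getElem?_getD, List.getElem?_eq_getElem h1] at this
  rw [List.getD_eq_getElem?_getD, List.getElem?_eq_getElem h2] at this
  simpa using this

-- A-side loop invariant: the running-counter loop appends the prefix-count uids.
theorem generate_mu_uids_loop_eq (xs : List Int) :
    ∀ (pre : List Int) (d : PySem.Dict Int Int) (acc : List String),
    (∀ v, d.getD v 0 = (pre.count v : Int)) →
    (xs.foldl
      (fun (st : PySem.Dict Int Int × List String) grid_idx =>
        let count := st.1.getD grid_idx 0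
        (st.1.insert grid_idx (count + 1),
         st.2 ++ ["g" ++ PySem.Int.toStr grid_idx ++ "_mu" ++ PySem.Int.toStr count]))
      (d, acc)).2 =
    acc ++ (PySem.List.enumerate xs (pre.length : Int)).map
      (fun p =>
        "g" ++ PySem.Int.toStr p.2 ++ "_mu" ++
          PySem.Int.toStr (((PySem.List.slice (pre ++ xs) none (some p.1)).count p.2 : Int))) := by
  induction xs with
  | nil => intro pre d acc hd; simp [PySem.List.enumerate_nil]
  | cons x xs ih =>
    intro pre d acc hd
    rw [List.foldl_cons]
    have hstep := ih (pre ++ [x]) (d.insert x (d.getD x 0 + 1))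
      (acc ++ ["g" ++ PySem.Int.toStr x ++ "_mu" ++ PySem.Int.toStr (d.getD x 0)])
      (by
        intro v
        rw [PySem.Dict.getD_insert]
        by_cases hvx : v = x
        · subst hvx; simp [hd, List.count_append]
        · simp [hvx, hd, List.count_append, List.count_singleton,
            (show ¬ (x == v) = true by simp [Ne.symm hvx])])
    simp only at hstep
    rw [hstep]
    rw [PySem.List.enumerate_cons, List.map_cons]
    have hsl : PySem.List.slice (pre ++ x :: xs) none (some ((pre.length : Nat) : Int)) = pre := by
      rw [PySem.List.slice_to_natCast]; exact List.take_left
    have hlen : ((pre ++ [x]).length : Int) = (pre.length : Int) + 1 := by simp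
    have hl : (pre ++ [x]) ++ xs = pre ++ x :: xs := by simp
    rw [hlen, hl, hsl, hd x]
    simp

theorem A_eq_refList (xs : List Int) : generate_mu_uids_py xs = refList xs := by
  unfold generate_mu_uids_py refList fmtUid
  have h := generate_mu_uids_loop_eq xs [] PySem.Dict.empty []
    (by intro v; simp [PySem.Dict.getD_empty])
  simpa using h



-- ===== VERDICT (by name: the statement is the Claim_ definition above) =====
theorem generate_mu_uids_py_spec : Claim_equal_generate_mu_uids_py := by
  intro xs _
  show generate_mu_uids_py xs = generate_mu_uids_py_alt xs
  rw [A_eq_refList, B_eq_refList]
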